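-- pv_equiv track=rewrite | github.com/brylevkirill/angel | angel.py | track_artist
-- ===== SOURCE A (Python) =====
-- def track_artist(id):
--     artist, *_ = id.split(' - ', 1)
--     for lexema, titles, spaces \
--         in tracks_collab:
--         if titles is not True:
--             first, other = None, None
--             if spaces is not False:
--                 if f' {lexema} ' in artist:
--                     first, other = \
--                         artist.split(
--                             f' {lexema} ', 1
--                         )
--                     return [
--                         first.strip(),
--                         *track_artist(other)
--                     ]
--             if spaces is not True:
--                 if lexema in artist:
--                     first, other = \
--                         artist.split(lexema, 1)
--                     return [
--                         first.strip(),
--                         *track_artist(other)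
--                     ]
--     return [artist.strip()]
--
-- tracks_collab = (
--     ('featuring', None, True),
--     ('feat.', None, True),
--     ('feat', None, True),
--     ('ft.', None, True),
--     ('ft', None, True),
--     ('with', False, True),
--     ('w/', False, True),
--     ('and', False, True),
--     ('vs.', False, True),
--     ('vs', False, True),
--     ('pres.', False, True),
--     ('pres', False, True),
--     ('x', False, True),
--     ('&', False, None),
--     (',', False, None),
--     ('/', False, None),
--     ('\\', False, None)
-- )
-- ===== SOURCE B (Python) =====
-- _SEPARATORS = []
-- for _lexema, _titles, _spaces in (
--     ('featuring', None, True), ('feat.', None, True), ('feat', None, True),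
--     ('ft.', None, True), ('ft', None, True), ('with', False, True),
--     ('w/', False, True), ('and', False, True), ('vs.', False, True),
--     ('vs', False, True), ('pres.', False, True), ('pres', False, True),
--     ('x', False, True), ('&', False, None), (',', False, None),
--     ('/', False, None), ('\\', False, None)
-- ):
--     _SEPARATORS.append(' %s ' % _lexema)
--     if _spaces is None:
--         _SEPARATORS.append(_lexema)
--
--
-- def track_artist(id):
--     results = []
--     current = id
--     while True:
--         current = current.split(' - ', 1)[0]
--         for sep in _SEPARATORS:
--             if sep in current:
--                 first, current = current.split(sep, 1)
--                 results.append(first.strip())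
--                 break
--         else:
--             results.append(current.strip())
--             return results
-- ===== Notes on version B (the rewrite author's own statement) =====
-- stated objective: simpler
-- what changed: Replaced the recursion over the (lexema, titles, spaces) table with its dual spaced/unspaced membership logic by a single while loop with a results accumulator scanning a flat, precomputed list of separator strings in the same check order.
import Mathlib
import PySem

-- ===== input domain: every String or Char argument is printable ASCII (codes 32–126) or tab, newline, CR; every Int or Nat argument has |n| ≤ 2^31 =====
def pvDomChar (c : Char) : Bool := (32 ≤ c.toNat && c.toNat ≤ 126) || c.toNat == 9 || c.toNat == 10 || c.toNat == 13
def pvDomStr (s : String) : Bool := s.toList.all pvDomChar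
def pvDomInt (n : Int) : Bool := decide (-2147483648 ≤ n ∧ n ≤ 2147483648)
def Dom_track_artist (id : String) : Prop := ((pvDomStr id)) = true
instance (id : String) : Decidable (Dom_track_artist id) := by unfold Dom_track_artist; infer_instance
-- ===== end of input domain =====

-- B replaces A's recursion over a (lexema, titles, spaces) table by a while loop with an
-- accumulator over a precomputed flat separator list (objective: simpler decomposition).

-- shared primitive wrappers: `s.split(sep, 1)[0]` resp. the (first, rest) pair of `s.split(sep, 1)`
-- (exact via PySem.Str.splitMax?; for sep ≠ "" the result is `some` of a nonempty list)
def pvDashHead (s : String) : String :=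
  ((PySem.Str.splitMax? s " - " 1).getD [s]).headD s

def pvSplit1 (s sep : String) : String × String :=
  let ps := (PySem.Str.splitMax? s sep 1).getD [s]
  (ps.headD s, ps.getD 1 "")

-- ===== PORT A =====
-- tracks_collab: Python True/False/None as Option Bool (some true / some false / none)
def pvTracksCollab : List (String × Option Bool × Option Bool) :=
  [("featuring", none, some true), ("feat.", none, some true), ("feat", none, some true),
   ("ft.", none, some true), ("ft", none, some true), ("with", some false, some true),
   ("w/", some false, some true), ("and", some false, some true), ("vs.", some false, some true),
   ("vs", some false, some true), ("pres.", some false, some true), ("pres", some false, some true),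
   ("x", some false, some true), ("&", some false, none), (",", some false, none),
   ("/", some false, none), ("\\", some false, none)]

-- A's for-loop: the first separator split it returns on, `none` when the loop falls through
def pvALoop (artist : String) : List (String × Option Bool × Option Bool) → Option (String × String)
  | [] => none
  | (lexema, titles, spaces) :: rest =>
    if titles ≠ some true then
      if spaces ≠ some false ∧ PySem.Str.isIn (" " ++ lexema ++ " ") artist then
        some (pvSplit1 artist (" " ++ lexema ++ " "))
      else if spaces ≠ some true ∧ PySem.Str.isIn lexema artist then
        some (pvSplit1 artist lexema)
      else pvALoop artist rest
    else pvALoop artist rest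

-- A's recursion, with a fuel guard making it total (each recursive call strictly shortens the
-- string, so fuel `len id + 1` is never exhausted)
def pvAGo : Nat → String → List String
  | 0, _ => []
  | n + 1, id =>
    let artist := pvDashHead id
    match pvALoop artist pvTracksCollab with
    | some (first, other) => PySem.Str.strip first :: pvAGo n other
    | none => [PySem.Str.strip artist]

def track_artist (id : String) : List String :=
  pvAGo (id.toList.length + 1) id

-- ===== PORT B =====
-- the precomputed flat separator list _SEPARATORS of Source B
def pvAltSeps : List String :=
  [" featuring ", " feat. ", " feat ", " ft. ", " ft ", " with ", " w/ ", " and ", " vs. ",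
   " vs ", " pres. ", " pres ", " x ", " & ", "&", " , ", ",", " / ", "/", " \\ ", "\\"]

-- B's inner for-loop: split on the first separator occurring in `current`
def pvAltFind (current : String) : List String → Option (String × String)
  | [] => none
  | sep :: rest =>
    if PySem.Str.isIn sep current then some (pvSplit1 current sep)
    else pvAltFind current rest

-- B's while loop, results accumulator threaded through; same fuel guard
def pvBGo : Nat → String → List String → List String
  | 0, _, results => results
  | n + 1, current, results =>
    let current := pvDashHead current
    match pvAltFind current pvAltSeps with
    | some (first, cur') => pvBGo n cur' (results ++ [PySem.Str.strip first])
    | none => results ++ [PySem.Str.strip current]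

def track_artist_alt (id : String) : List String :=
  pvBGo (id.toList.length + 1) id []

-- ===== PRECONDITION & SPEC =====
def Spec_track_artist (id : String) (out : List String) : Prop := out = track_artist_alt id
instance (id : String) (out : List String) : Decidable (Spec_track_artist id out) := by unfold Spec_track_artist; infer_instance

-- ===== CLAIM (what is proved, stated in full; the proofs are below) =====
def Claim_equal_track_artist : Prop := ∀ (id : String), Dom_track_artist id → Spec_track_artist id (track_artist id)

-- ===== LEMMAS AND PROOFS =====
-- A's table scan with the titles/spaces logic equals B's scan of the flat separator list
theorem pvALoop_eq_pvAltFind (artist : String) :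
    pvALoop artist pvTracksCollab = pvAltFind artist pvAltSeps := by
  simp [pvALoop, pvAltFind, pvTracksCollab, pvAltSeps]

theorem pvBGo_eq (n : Nat) (cur : String) (acc : List String) :
    pvBGo n cur acc = acc ++ pvAGo n cur := by
  induction n generalizing cur acc with
  | zero => simp [pvBGo, pvAGo]
  | succ n ih =>
    simp only [pvBGo, pvAGo, pvALoop_eq_pvAltFind]
    cases h : pvAltFind (pvDashHead cur) pvAltSeps with
    | none => simp
    | some p => simp [ih]

-- ===== VERDICT (by name: the statement is the Claim_ definition above) =====
theorem track_artist_spec : Claim_equal_track_artist := by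
  intro id _
  unfold Spec_track_artist track_artist track_artist_alt
  rw [pvBGo_eq]
  simp
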